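-- pv_equiv track=rewrite | github.com/archeious/luminos | luminos_lib/report.py | format_flags
-- ===== SOURCE A (Python) =====
-- _SEVERITY_ORDER = {"critical": 0, "concern": 1, "info": 2}
--
-- def format_flags(flags):
--     """Format a list of flag dicts as a human-readable string.
--
--     Returns empty string if flags is empty.
--     """
--     if not flags:
--         return ""
--
--     sorted_flags = sorted(flags, key=lambda f: _SEVERITY_ORDER.get(
--         f.get("severity", "info"), 99))
--
--     lines = []
--     lines.append("")
--     lines.append(">> FLAGS")
--     lines.append("-" * 40)
--     for f in sorted_flags:
--         severity = f.get("severity", "info").upper()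
--         path = f.get("path", "general")
--         finding = f.get("finding", "")
--         lines.append(f"  [{severity:<8s}] {path}")
--         lines.append(f"             {finding}")
--
--     return "\n".join(lines)
-- ===== SOURCE B (Python) =====
-- _RANK = {"critical": 0, "concern": 1, "info": 2}
--
--
-- def format_flags(flags):
--     """Format a list of flag dicts as a human-readable string.
--
--     Instead of sorting, make four passes over flags (one per severity rank:
--     critical, concern, info, then everything unknown), appending each matching
--     flag's two formatted lines directly onto the output string.  Pass order +
--     original order within a pass reproduces the stable sort by rank.
--     Returns empty string if flags is empty.
--     """
--     if not flags:
--         return ""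
--
--     out = "\n>> FLAGS\n" + "-" * 40
--     for rank in (0, 1, 2, 99):
--         for f in flags:
--             if _RANK.get(f.get("severity", "info"), 99) == rank:
--                 out += "\n  [" + f.get("severity", "info").upper().ljust(8) \
--                     + "] " + f.get("path", "general")
--                 out += "\n             " + f.get("finding", "")
--     return out
-- ===== Notes on version B (the rewrite author's own statement) =====
-- stated objective: alternative
-- what changed: Replaces the stable sort + list-of-lines + join with four direct passes over the unsorted input (one per severity rank: critical, concern, info, unknown), concatenating each matching flag's two formatted lines straight onto the output string; pass order plus original order within a pass reproduces the stable sort.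
import Mathlib
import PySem

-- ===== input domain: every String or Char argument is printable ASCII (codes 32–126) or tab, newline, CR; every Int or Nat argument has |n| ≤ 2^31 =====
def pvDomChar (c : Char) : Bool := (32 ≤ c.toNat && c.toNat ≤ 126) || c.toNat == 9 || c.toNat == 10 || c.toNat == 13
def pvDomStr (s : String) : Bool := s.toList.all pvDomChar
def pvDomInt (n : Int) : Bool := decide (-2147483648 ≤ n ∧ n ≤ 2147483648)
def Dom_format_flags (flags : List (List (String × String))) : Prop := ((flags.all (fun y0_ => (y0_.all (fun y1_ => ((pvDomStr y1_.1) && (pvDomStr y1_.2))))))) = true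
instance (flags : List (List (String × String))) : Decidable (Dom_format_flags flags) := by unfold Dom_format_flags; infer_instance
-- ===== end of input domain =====

-- B replaces A's stable sort + list-of-lines + join with four direct passes over the
-- unsorted input (one per severity rank), concatenating onto the output string; same output.

-- ===== PORT A =====
-- _SEVERITY_ORDER = {"critical": 0, "concern": 1, "info": 2}
def sevOrder : PySem.Dict String Int := PySem.Dict.mk [("critical", 0), ("concern", 1), ("info", 2)]

-- _SEVERITY_ORDER.get(f.get("severity", "info"), 99)  (A's sort key)
def flagRank (f : List (String × String)) : Int :=
  sevOrder.getD ((PySem.Dict.mk f).getD "severity" "info") 99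

-- f"  [{severity:<8s}] {path}": left-justify to width 8 with spaces (exact on ASCII strings)
def ljust8 (s : String) : String := s ++ String.ofList (List.replicate (8 - s.toList.length) ' ')

-- the two lines A appends per flag f
def flagLine1 (f : List (String × String)) : String :=
  "  [" ++ ljust8 (PySem.Str.upper ((PySem.Dict.mk f).getD "severity" "info")) ++ "] "
    ++ (PySem.Dict.mk f).getD "path" "general"

def flagLine2 (f : List (String × String)) : String :=
  "             " ++ (PySem.Dict.mk f).getD "finding" ""

-- "-" * 40
def dashes40 : String := String.ofList (List.replicate 40 '-')

def format_flags (flags : List (List (String × String))) : String :=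
  if flags = [] then ""
  else
    let sorted_flags := PySem.List.sorted flags flagRank false
    let lines := sorted_flags.foldl
      (fun acc f => (acc ++ [flagLine1 f]) ++ [flagLine2 f])
      ["", ">> FLAGS", dashes40]
    PySem.Str.join "\n" lines

-- ===== PORT B =====
-- _RANK = {"critical": 0, "concern": 1, "info": 2}
def bRankTable : PySem.Dict String Int := PySem.Dict.mk [("critical", 0), ("concern", 1), ("info", 2)]

-- f.get(k, d)
def bGet (f : List (String × String)) (k d : String) : String := (PySem.Dict.mk f).getD k d

-- _RANK.get(f.get("severity", "info"), 99)
def bRank (f : List (String × String)) : Int := bRankTable.getD (bGet f "severity" "info") 99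

-- s.ljust(8)
def bPad8 (s : String) : String := s ++ String.ofList (List.replicate (8 - s.toList.length) ' ')

def format_flags_alt (flags : List (List (String × String))) : String :=
  if flags = [] then ""
  else
    -- out = "\n>> FLAGS\n" + "-" * 40; for rank in (0,1,2,99): for f in flags: if rank matches, out += the two lines
    (([0, 1, 2, 99] : List Int)).foldl
      (fun out r => flags.foldl
        (fun out f =>
          if bRank f == r then
            (out ++ ("\n  [" ++ bPad8 (PySem.Str.upper (bGet f "severity" "info")) ++ "] "
                      ++ bGet f "path" "general"))
              ++ ("\n             " ++ bGet f "finding" "")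
          else out)
        out)
      ("\n>> FLAGS\n" ++ String.ofList (List.replicate 40 '-'))

-- ===== PRECONDITION & SPEC =====
def Spec_format_flags (flags : List (List (String × String))) (out : String) : Prop := out = format_flags_alt flags
instance (flags : List (List (String × String))) (out : String) : Decidable (Spec_format_flags flags out) := by unfold Spec_format_flags; infer_instance

-- ===== CLAIM (what is proved, stated in full; the proofs are below) =====
def Claim_equal_format_flags : Prop := ∀ (flags : List (List (String × String))), Dom_format_flags flags → Spec_format_flags flags (format_flags flags)

-- ===== LEMMAS AND PROOFS =====

-- the two lines a flag contributes (A-side)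
def emitFlag (f : List (String × String)) : List String := [flagLine1 f, flagLine2 f]

-- the string step shared by both sides after normalisation
def emitStep (s : String) (f : List (String × String)) : String :=
  (s ++ ("\n" ++ flagLine1 f)) ++ ("\n" ++ flagLine2 f)

-- the rank takes only the four values 0, 1, 2, 99
theorem flagRank_cases (f : List (String × String)) :
    flagRank f = 0 ∨ flagRank f = 1 ∨ flagRank f = 2 ∨ flagRank f = 99 := by
  unfold flagRank
  generalize (PySem.Dict.mk f).getD "severity" "info" = s
  simp only [sevOrder, PySem.Dict.getD, PySem.Dict.get?_mk_cons]
  split_ifs <;> simp [PySem.Dict.get?]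

-- insertBy passes over a prefix it does not go before
theorem insertBy_append {α : Type} (before : α → α → Bool) (x : α) (l1 l2 : List α)
    (h : ∀ y ∈ l1, before x y = false) :
    PySem.List.insertBy before x (l1 ++ l2) = l1 ++ PySem.List.insertBy before x l2 := by
  induction l1 with
  | nil => simp
  | cons a t ih =>
    simp only [List.cons_append, PySem.List.insertBy, h a (by simp)]
    simp only [Bool.false_eq_true, if_false, List.cons.injEq, true_and]
    exact ih (fun y hy => h y (by simp [hy]))

-- insertBy goes in front of a list it goes before everywhere
theorem insertBy_all {α : Type} (before : α → α → Bool) (x : α) (l : List α)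
    (h : ∀ y ∈ l, before x y = true) :
    PySem.List.insertBy before x l = x :: l := by
  cases l with
  | nil => rfl
  | cons a t => simp [PySem.List.insertBy, h a (by simp)]

-- stable insertion in the middle: x lands after its own bucket, before the larger ones
theorem insertBy_mid {α : Type} (before : α → α → Bool) (x : α) (l1 l2 : List α)
    (h1 : ∀ y ∈ l1, before x y = false) (h2 : ∀ y ∈ l2, before x y = true) :
    PySem.List.insertBy before x (l1 ++ l2) = l1 ++ [x] ++ l2 := by
  rw [insertBy_append _ _ _ _ h1, insertBy_all _ _ _ h2]
  simp

-- a member of a rank-r bucket has rank r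
theorem rank_of_mem_filter (r : Int) (xs : List (List (String × String)))
    (y : List (String × String)) (hy : y ∈ xs.filter (fun f => flagRank f == r)) :
    flagRank y = r := by
  have := List.of_mem_filter hy
  simpa using this

-- the stable sort by rank is the concatenation of the four rank classes in rank order
theorem sorted_eq_buckets (xs : List (List (String × String))) :
    PySem.List.sorted xs flagRank false =
      xs.filter (fun f => flagRank f == 0) ++ xs.filter (fun f => flagRank f == 1)
        ++ xs.filter (fun f => flagRank f == 2) ++ xs.filter (fun f => flagRank f == 99) := by
  rw [PySem.List.sorted_eq_foldl_insertBy]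
  induction xs using List.reverseRecOn with
  | nil => rfl
  | append_singleton t x ih =>
    rw [List.foldl_append, List.foldl_cons, List.foldl_nil, ih]
    simp only [List.filter_append, List.filter_cons, List.filter_nil]
    set b0 := t.filter (fun f => flagRank f == 0) with hb0
    set b1 := t.filter (fun f => flagRank f == 1) with hb1
    set b2 := t.filter (fun f => flagRank f == 2) with hb2
    set b99 := t.filter (fun f => flagRank f == 99) with hb99
    have m0 : ∀ y ∈ b0, flagRank y = 0 := fun y hy => rank_of_mem_filter 0 t y (hb0 ▸ hy)
    have m1 : ∀ y ∈ b1, flagRank y = 1 := fun y hy => rank_of_mem_filter 1 t y (hb1 ▸ hy)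
    have m2 : ∀ y ∈ b2, flagRank y = 2 := fun y hy => rank_of_mem_filter 2 t y (hb2 ▸ hy)
    have m99 : ∀ y ∈ b99, flagRank y = 99 := fun y hy => rank_of_mem_filter 99 t y (hb99 ▸ hy)
    rcases flagRank_cases x with h | h | h | h
    · -- rank 0: after b0, before b1 ++ b2 ++ b99
      simp only [h]
      rw [show ((b0 ++ b1) ++ b2) ++ b99 = b0 ++ (b1 ++ (b2 ++ b99)) by
            simp only [List.append_assoc],
          insertBy_mid _ _ _ _
            (by intro y hy; simp [h, m0 y hy])
            (by intro y hy
                simp only [List.mem_append] at hy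
                rcases hy with hy | hy | hy
                · simp [h, m1 y hy]
                · simp [h, m2 y hy]
                · simp [h, m99 y hy])]
      simp [List.append_assoc]
    · -- rank 1
      simp only [h]
      rw [show ((b0 ++ b1) ++ b2) ++ b99 = (b0 ++ b1) ++ (b2 ++ b99) by
            simp only [List.append_assoc],
          insertBy_mid _ _ _ _
            (by intro y hy
                simp only [List.mem_append] at hy
                rcases hy with hy | hy
                · simp [h, m0 y hy]
                · simp [h, m1 y hy])
            (by intro y hy
                simp only [List.mem_append] at hy
                rcases hy with hy | hy
                · simp [h, m2 y hy]
                · simp [h, m99 y hy])]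
      simp [List.append_assoc]
    · -- rank 2
      simp only [h]
      rw [show ((b0 ++ b1) ++ b2) ++ b99 = ((b0 ++ b1) ++ b2) ++ b99 from rfl,
          insertBy_append _ _ ((b0 ++ b1) ++ b2) b99
            (by intro y hy
                simp only [List.mem_append] at hy
                rcases hy with (hy | hy) | hy
                · simp [h, m0 y hy]
                · simp [h, m1 y hy]
                · simp [h, m2 y hy]),
          insertBy_all _ _ _ (by intro y hy; simp [h, m99 y hy])]
      simp [List.append_assoc]
    · -- rank 99: goes at the very end
      simp only [h]
      rw [show (((b0 ++ b1) ++ b2) ++ b99) = (((b0 ++ b1) ++ b2) ++ b99) ++ [] by simp,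
          insertBy_append _ _ (((b0 ++ b1) ++ b2) ++ b99) []
            (by intro y hy
                simp only [List.mem_append] at hy
                rcases hy with ((hy | hy) | hy) | hy
                · simp [h, m0 y hy]
                · simp [h, m1 y hy]
                · simp [h, m2 y hy]
                · simp [h, m99 y hy])]
      simp [PySem.List.insertBy, List.append_assoc]

-- A's line-appending loop, as a flatMap
theorem foldl_emit (l : List (List (String × String))) (acc : List String) :
    l.foldl (fun acc f => (acc ++ [flagLine1 f]) ++ [flagLine2 f]) acc
      = acc ++ l.flatMap emitFlag := by
  rw [PySem.List.foldl_congr_mem l _ (fun acc f => acc ++ emitFlag f) acc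
        (by intro acc x _; simp [emitFlag]),
      PySem.List.foldl_append_eq_flatMap]

-- "\n".join(a :: l) concatenates left to right
theorem join_cons_cons (a b : String) (l : List String) :
    PySem.Str.join "\n" (a :: b :: l) = a ++ "\n" ++ PySem.Str.join "\n" (b :: l) := by
  apply String.toList_injective
  simp [PySem.Str.join, PySem.Chars.join_cons_cons, String.toList_append, String.toList_ofList]

theorem join_foldl (l : List String) (a : String) :
    PySem.Str.join "\n" (a :: l) = l.foldl (fun s x => s ++ ("\n" ++ x)) a := by
  induction l generalizing a with
  | nil =>
    apply String.toList_injective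
    simp [PySem.Str.join, PySem.Chars.join_singleton]
  | cons b t ih =>
    rw [join_cons_cons, List.foldl_cons]
    have : ∀ (t : List String) (p s : String),
        p ++ t.foldl (fun s x => s ++ ("\n" ++ x)) s = t.foldl (fun s x => s ++ ("\n" ++ x)) (p ++ s) := by
      intro t
      induction t with
      | nil => intro p s; rfl
      | cons c u ihu =>
        intro p s
        simp only [List.foldl_cons, ihu, String.append_assoc]
    rw [ih, String.append_assoc, this t "\n" b]
    exact this t a ("\n" ++ b)

-- joining pairs of flag lines = folding the string step
theorem foldl_flatMap_emit (L : List (List (String × String))) (acc : String) :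
    (L.flatMap emitFlag).foldl (fun s x => s ++ ("\n" ++ x)) acc = L.foldl emitStep acc := by
  induction L generalizing acc with
  | nil => rfl
  | cons f t ih => simp only [List.flatMap_cons, emitFlag, List.cons_append, List.nil_append,
      List.foldl_cons, ih, emitStep]

-- folding a filter = folding with a guard
theorem foldl_filter_guard {α β : Type} (p : α → Bool) (g : β → α → β) (l : List α) (acc : β) :
    l.foldl (fun b a => if p a then g b a else b) acc = (l.filter p).foldl g acc := by
  induction l generalizing acc with
  | nil => rfl
  | cons x t ih =>
    simp only [List.foldl_cons, List.filter_cons]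
    by_cases h : p x = true
    · simp [h, ih]
    · rw [if_neg h, if_neg h, ih]

-- B's guarded inner step is A's emitStep
theorem bstep_eq (out : String) (f : List (String × String)) :
    (out ++ ("\n  [" ++ bPad8 (PySem.Str.upper (bGet f "severity" "info")) ++ "] "
        ++ bGet f "path" "general"))
      ++ ("\n             " ++ bGet f "finding" "") = emitStep out f := by
  apply String.toList_injective
  simp [emitStep, flagLine1, flagLine2, bGet, bPad8, ljust8, String.toList_append]

-- B's rank is A's rank
theorem bRank_eq (f : List (String × String)) : bRank f = flagRank f := rfl

-- B's header string is A's first three joined lines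
theorem header_eq :
    ("\n>> FLAGS\n" ++ String.ofList (List.replicate 40 '-')) =
      (("" ++ ("\n" ++ ">> FLAGS")) ++ ("\n" ++ dashes40)) := by
  apply String.toList_injective
  simp [dashes40]

-- ===== VERDICT (by name: the statement is the Claim_ definition above) =====
theorem format_flags_spec : Claim_equal_format_flags := by
  intro flags _
  unfold Spec_format_flags format_flags format_flags_alt
  by_cases hnil : flags = []
  · simp [hnil]
  · simp only [hnil, if_false]
    -- A: join → string fold over the sorted list
    rw [foldl_emit]
    have hA : PySem.Str.join "\n" (["", ">> FLAGS", dashes40]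
          ++ (PySem.List.sorted flags flagRank false).flatMap emitFlag)
        = (PySem.List.sorted flags flagRank false).foldl emitStep
            (("" ++ ("\n" ++ ">> FLAGS")) ++ ("\n" ++ dashes40)) := by
      rw [show (["", ">> FLAGS", dashes40]
            ++ (PySem.List.sorted flags flagRank false).flatMap emitFlag)
          = "" :: ">> FLAGS" :: dashes40
              :: (PySem.List.sorted flags flagRank false).flatMap emitFlag from rfl,
         join_foldl, List.foldl_cons, List.foldl_cons, foldl_flatMap_emit]
    rw [hA, sorted_eq_buckets, List.foldl_append, List.foldl_append, List.foldl_append]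
    -- B: guarded passes → filtered folds, then fuse the four ranks
    simp only [List.foldl_cons, List.foldl_nil]
    simp only [bRank_eq, bstep_eq, foldl_filter_guard, ← header_eq]
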